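-- pv_equiv track=rewrite | github.com/elmaa11/advent-of-code | AOC2020/day1part2.py | getThreeEntries
-- ===== SOURCE A (Python) =====
-- def getThreeEntries (arr, total):
--     numEl = len(arr)
--
--     for i in range(numEl):
--         for j in range(i + 1, numEl):
--             for k in range(j + 1, numEl):
--                 if int(arr[i]) + int(arr[j]) + int(arr[k]) == total:
--                     return [arr[i], arr[j], arr[k]]
--
--     return [0, 0]
-- ===== SOURCE B (Python) =====
-- def getThreeEntries(arr, total):
--     n = len(arr)
--     for i in range(n):
--         counts = {}
--         for v in arr[i + 1:]:
--             counts[v] = counts.get(v, 0) + 1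
--         for j in range(i + 1, n):
--             counts[arr[j]] = counts.get(arr[j], 0) - 1
--             need = total - arr[i] - arr[j]
--             if counts.get(need, 0) > 0:
--                 return [arr[i], arr[j], need]
--     return [0, 0]
-- ===== Notes on version B (the rewrite author's own statement) =====
-- stated objective: faster
-- what changed: Replaces A's innermost scan for the third entry by a count dictionary of the suffix, built per i and decremented as j advances, so each (i,j) pair is checked with one hash lookup.
import Mathlib
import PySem

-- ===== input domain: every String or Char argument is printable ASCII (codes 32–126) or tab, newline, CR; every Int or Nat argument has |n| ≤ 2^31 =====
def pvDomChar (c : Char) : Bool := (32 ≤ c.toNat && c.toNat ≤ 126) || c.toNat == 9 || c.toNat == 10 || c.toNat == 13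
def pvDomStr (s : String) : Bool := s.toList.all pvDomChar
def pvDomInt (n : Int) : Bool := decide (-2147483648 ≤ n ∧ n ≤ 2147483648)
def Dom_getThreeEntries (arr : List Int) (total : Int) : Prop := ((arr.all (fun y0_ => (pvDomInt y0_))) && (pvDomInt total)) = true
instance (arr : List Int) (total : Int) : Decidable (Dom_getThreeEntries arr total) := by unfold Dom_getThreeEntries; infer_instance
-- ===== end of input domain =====

-- B replaces A's innermost scan for the third entry by a count dictionary of the
-- suffix maintained while j advances (O(n^2) vs A's O(n^3)); same first (i,j) pair,
-- same returned values.

-- ===== PORT A =====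
def getThreeEntries (arr : List Int) (total : Int) : List Int :=
  let numEl : Int := arr.length
  match (PySem.List.pyRange 0 numEl 1).findSome? (fun i =>
    (PySem.List.pyRange (i+1) numEl 1).findSome? (fun j =>
      (PySem.List.pyRange (j+1) numEl 1).findSome? (fun k =>
        if PySem.List.pyGetD arr i 0 + PySem.List.pyGetD arr j 0 + PySem.List.pyGetD arr k 0 = total
        then some [PySem.List.pyGetD arr i 0, PySem.List.pyGetD arr j 0, PySem.List.pyGetD arr k 0]
        else none))) with
  | some r => r
  | none => [0, 0]

-- ===== PORT B =====
-- the 'for j in range(i+1, n)' loop of Source B, with its early return and the counts dict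
def altJLoop (arr : List Int) (total xi : Int) (js : List Int) (counts : PySem.Dict Int Int) :
    Option (List Int) :=
  match js with
  | [] => none
  | j :: rest =>
    let y := PySem.List.pyGetD arr j 0
    let counts1 := counts.modify y 0 (· - 1)
    let need := total - xi - y
    if counts1.getD need 0 > 0 then some [xi, y, need]
    else altJLoop arr total xi rest counts1

def getThreeEntries_alt (arr : List Int) (total : Int) : List Int :=
  let n : Int := arr.length
  match (PySem.List.pyRange 0 n 1).findSome? (fun i =>
    let counts := (PySem.List.slice arr (some (i+1)) none).foldl
        (fun d v => d.modify v 0 (· + 1)) PySem.Dict.empty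
    altJLoop arr total (PySem.List.pyGetD arr i 0) (PySem.List.pyRange (i+1) n 1) counts) with
  | some r => r
  | none => [0, 0]

-- ===== PRECONDITION & SPEC =====
def Spec_getThreeEntries (arr : List Int) (total : Int) (out : List Int) : Prop := out = getThreeEntries_alt arr total
instance (arr : List Int) (total : Int) (out : List Int) : Decidable (Spec_getThreeEntries arr total out) := by unfold Spec_getThreeEntries; infer_instance

-- ===== CLAIM (what is proved, stated in full; the proofs are below) =====
def Claim_equal_getThreeEntries : Prop := ∀ (arr : List Int) (total : Int), Dom_getThreeEntries arr total → Spec_getThreeEntries arr total (getThreeEntries arr total)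

-- ===== LEMMAS AND PROOFS =====

-- common reference form of the j-loop: first y in the suffix whose complement lies after it
def specJ (x total : Int) : List Int → Option (List Int)
  | [] => none
  | y :: rest =>
    if (total - x - y) ∈ rest then some [x, y, total - x - y] else specJ x total rest

theorem findSome?_congr' {α β : Type} (l : List α) (f g : α → Option β)
    (h : ∀ a ∈ l, f a = g a) : l.findSome? f = l.findSome? g := by
  induction l with
  | nil => rfl
  | cons a t ih =>
    simp only [List.findSome?_cons, h a (by simp)]
    cases g a with
    | none => exact ih (fun b hb => h b (by simp [hb]))
    | some v => rfl

-- A's innermost k-scan over a value list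
theorem kScan (l : List Int) (x y total : Int) :
    l.findSome? (fun v => if x + y + v = total then some [x, y, v] else none)
      = if (total - x - y) ∈ l then some [x, y, total - x - y] else none := by
  induction l with
  | nil => simp
  | cons a t ih =>
    by_cases h : x + y + a = total
    · have : a = total - x - y := by omega
      simp [this]
    · have : ¬ (total - x - y = a) := by omega
      simp [h, ih, this, List.mem_cons]

-- findSome? over range(a, len) of a function of arr[k]  =  findSome? over the dropped suffix
theorem findSome?_pyRange_pyGetD {β : Type} (arr : List Int) (a : Int) (ha : 0 ≤ a)
    (g : Int → Option β) :
    (PySem.List.pyRange a (arr.length : Int) 1).findSome?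
        (fun k => g (PySem.List.pyGetD arr k 0))
      = (arr.drop a.toNat).findSome? g := by
  have hmap := PySem.List.map_pyGetD_pyRange' arr (0 : Int) ha
  calc (PySem.List.pyRange a (arr.length : Int) 1).findSome?
        (fun k => g (PySem.List.pyGetD arr k 0))
      = ((PySem.List.pyRange a (arr.length : Int) 1).map
          (fun k => PySem.List.pyGetD arr k 0)).findSome? g := by
        rw [List.findSome?_map]; rfl
    _ = (arr.drop a.toNat).findSome? g := by rw [hmap]

-- A's j-loop equals specJ on the suffix
theorem Aloop (arr : List Int) (total x : Int) :
    ∀ (m : Nat) (a : Int), 0 ≤ a → arr.length ≤ a.toNat + m →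
    (PySem.List.pyRange a (arr.length : Int) 1).findSome? (fun j =>
        (PySem.List.pyRange (j+1) (arr.length : Int) 1).findSome? (fun k =>
          if x + PySem.List.pyGetD arr j 0 + PySem.List.pyGetD arr k 0 = total
          then some [x, PySem.List.pyGetD arr j 0, PySem.List.pyGetD arr k 0]
          else none))
      = specJ x total (arr.drop a.toNat) := by
  intro m
  induction m with
  | zero =>
    intro a ha hm
    have h1 : (arr.length : Int) ≤ a := by omega
    rw [PySem.List.pyRange_one_eq_nil h1, List.drop_eq_nil_of_le (by omega)]
    rfl
  | succ m ih =>
    intro a ha hm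
    by_cases hlt : a < (arr.length : Int)
    · have hna : a.toNat < arr.length := by omega
      have ht : (a+1).toNat = a.toNat + 1 := by omega
      have hy : PySem.List.pyGetD arr a 0 = arr[a.toNat] :=
        PySem.List.pyGetD_eq_getElem arr 0 ha (by omega)
      have hk := findSome?_pyRange_pyGetD arr (a+1) (by omega)
        (fun v => if x + PySem.List.pyGetD arr a 0 + v = total
                  then some [x, PySem.List.pyGetD arr a 0, v] else none)
      have hdrop : arr.drop a.toNat = arr[a.toNat] :: arr.drop (a.toNat + 1) :=
        List.drop_eq_getElem_cons hna
      rw [PySem.List.pyRange_one_cons hlt, List.findSome?_cons, hk, kScan, ht, hdrop, hy]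
      by_cases hmem : (total - x - arr[a.toNat]) ∈ arr.drop (a.toNat + 1)
      · simp [specJ, hmem]
      · rw [if_neg hmem]
        have h2 := ih (a+1) (by omega) (by omega)
        rw [ht] at h2
        simp [specJ, hmem, h2]
    · have h1 : (arr.length : Int) ≤ a := by omega
      rw [PySem.List.pyRange_one_eq_nil h1, List.drop_eq_nil_of_le (by omega)]
      rfl

-- B's j-loop equals specJ on the suffix, given the counts invariant
theorem Bloop (arr : List Int) (total x : Int) :
    ∀ (m : Nat) (a : Int) (d : PySem.Dict Int Int), 0 ≤ a → arr.length ≤ a.toNat + m →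
    (∀ v, d.getD v 0 = ((arr.drop a.toNat).count v : Int)) →
    altJLoop arr total x (PySem.List.pyRange a (arr.length : Int) 1) d
      = specJ x total (arr.drop a.toNat) := by
  intro m
  induction m with
  | zero =>
    intro a d ha hm _
    have h1 : (arr.length : Int) ≤ a := by omega
    rw [PySem.List.pyRange_one_eq_nil h1, List.drop_eq_nil_of_le (by omega)]
    rfl
  | succ m ih =>
    intro a d ha hm hinv
    by_cases hlt : a < (arr.length : Int)
    · have hna : a.toNat < arr.length := by omega
      rw [PySem.List.pyRange_one_cons hlt]
      have hy : PySem.List.pyGetD arr a 0 = arr[a.toNat] :=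
        PySem.List.pyGetD_eq_getElem arr 0 ha (by omega)
      have hdrop : arr.drop a.toNat = arr[a.toNat] :: arr.drop (a.toNat + 1) :=
        List.drop_eq_getElem_cons hna
      have ht : (a+1).toNat = a.toNat + 1 := by omega
      -- invariant after the decrement
      have hcount : ∀ v : Int, (arr.drop a.toNat).count v
          = (arr.drop (a.toNat + 1)).count v + (if v = arr[a.toNat] then 1 else 0) := by
        intro v
        rw [hdrop, List.count_cons]
        simp only [beq_iff_eq]
        split_ifs with hv <;> omega
      have hinv1 : ∀ v, ((d.modify arr[a.toNat] 0 (· - 1)).getD v 0)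
          = ((arr.drop (a.toNat + 1)).count v : Int) := by
        intro v
        rw [PySem.Dict.getD_modify]
        simp only [hinv]
        have hc := hcount v
        split_ifs with hv
        · subst hv; simp at hc; omega
        · simp [hv] at hc; omega
      have hcond : ((d.modify arr[a.toNat] 0 (· - 1)).getD (total - x - arr[a.toNat]) 0 > 0)
          ↔ (total - x - arr[a.toNat]) ∈ arr.drop (a.toNat + 1) := by
        rw [hinv1]
        constructor
        · intro h; exact List.count_pos_iff.mp (by exact_mod_cast h)
        · intro h; exact_mod_cast List.count_pos_iff.mpr h
      rw [altJLoop]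
      simp only [hy]
      by_cases hmem : (total - x - arr[a.toNat]) ∈ arr.drop (a.toNat + 1)
      · rw [if_pos (hcond.mpr hmem), hdrop]
        simp [specJ, hmem]
      · rw [if_neg (fun h => hmem (hcond.mp h)), hdrop]
        simp only [specJ, hmem, if_false]
        have := ih (a+1) (d.modify arr[a.toNat] 0 (· - 1)) (by omega) (by omega)
          (by intro v; rw [ht]; exact hinv1 v)
        rw [ht] at this
        exact this
    · have h1 : (arr.length : Int) ≤ a := by omega
      rw [PySem.List.pyRange_one_eq_nil h1, List.drop_eq_nil_of_le (by omega)]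
      rfl

-- ===== VERDICT (by name: the statement is the Claim_ definition above) =====
theorem getThreeEntries_spec : Claim_equal_getThreeEntries := by
  intro arr total _
  unfold Spec_getThreeEntries
  simp only [getThreeEntries, getThreeEntries_alt]
  have hcong : ∀ i ∈ PySem.List.pyRange 0 (arr.length : Int) 1,
      (PySem.List.pyRange (i+1) (arr.length : Int) 1).findSome? (fun j =>
        (PySem.List.pyRange (j+1) (arr.length : Int) 1).findSome? (fun k =>
          if PySem.List.pyGetD arr i 0 + PySem.List.pyGetD arr j 0 + PySem.List.pyGetD arr k 0 = total
          then some [PySem.List.pyGetD arr i 0, PySem.List.pyGetD arr j 0, PySem.List.pyGetD arr k 0]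
          else none))
      = altJLoop arr total (PySem.List.pyGetD arr i 0)
          (PySem.List.pyRange (i+1) (arr.length : Int) 1)
          ((PySem.List.slice arr (some (i+1)) none).foldl
            (fun d v => d.modify v 0 (· + 1)) PySem.Dict.empty) := by
    intro i hi
    rw [PySem.List.mem_pyRange_one] at hi
    have hi0 : 0 ≤ i := hi.1
    have hslice : PySem.List.slice arr (some (i+1)) none = arr.drop (i+1).toNat := by
      have h1 : (i + 1) = ((i.toNat + 1 : Nat) : Int) := by omega
      rw [h1, PySem.List.slice_from_natCast, Int.toNat_natCast]
    have hcounts : ∀ v,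
        (((PySem.List.slice arr (some (i+1)) none).foldl
            (fun d v => d.modify v 0 (· + 1)) PySem.Dict.empty).getD v 0)
          = ((arr.drop (i+1).toNat).count v : Int) := by
      intro v
      rw [hslice, PySem.Dict.getD_foldl_modify_add_one]
      simp [PySem.Dict.empty, PySem.Dict.getD, PySem.Dict.get?]
    rw [Aloop arr total (PySem.List.pyGetD arr i 0) arr.length (i+1) (by omega) (by omega),
        Bloop arr total (PySem.List.pyGetD arr i 0) arr.length (i+1)
          _ (by omega) (by omega) hcounts]
  rw [findSome?_congr' _ _ _ hcong]
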